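-- pv_equiv track=rewrite | github.com/Indivicivet/untappd_analytics | scripts/time_of_day_kdes.py | get_quantiles
-- ===== SOURCE A (Python) =====
-- def get_quantiles(data, n_blocks):
--     blocks = []
--     total = len(data)
--     for i in range(n_blocks):
--         start = i * total // n_blocks
--         end = (i + 1) * total // n_blocks
--         blocks.append(data[start:end])
--     return blocks
-- ===== SOURCE B (Python) =====
-- def get_quantiles(data, n_blocks):
--     # B: one divmod, then a Bresenham-style error accumulator decides each
--     # block's size (q or q+1) while a cursor walks the list; no per-block division.
--     if n_blocks <= 0:
--         return []
--     q, r = divmod(len(data), n_blocks)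
--     blocks = []
--     pos = 0
--     acc = 0
--     for _ in range(n_blocks):
--         acc += r
--         if acc >= n_blocks:
--             acc -= n_blocks
--             size = q + 1
--         else:
--             size = q
--         blocks.append(data[pos:pos + size])
--         pos += size
--     return blocks
-- ===== Notes on version B (the rewrite author's own statement) =====
-- stated objective: alternative
-- what changed: B replaces A's per-block start/end floor-divisions by a single divmod followed by a Bresenham-style remainder accumulator that decides each block's size (q or q+1) while a cursor walks the list.
import Mathlib
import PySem

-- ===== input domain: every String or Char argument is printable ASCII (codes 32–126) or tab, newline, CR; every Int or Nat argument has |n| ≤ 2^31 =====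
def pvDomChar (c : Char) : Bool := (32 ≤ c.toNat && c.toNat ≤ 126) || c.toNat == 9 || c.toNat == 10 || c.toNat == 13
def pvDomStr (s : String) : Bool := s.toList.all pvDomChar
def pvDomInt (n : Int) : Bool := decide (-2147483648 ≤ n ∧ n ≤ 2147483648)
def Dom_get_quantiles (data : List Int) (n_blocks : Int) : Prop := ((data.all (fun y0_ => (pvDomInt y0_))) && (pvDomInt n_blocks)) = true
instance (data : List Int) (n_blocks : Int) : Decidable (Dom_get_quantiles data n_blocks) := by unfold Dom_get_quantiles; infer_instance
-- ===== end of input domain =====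

-- B replaces A's per-block floor-divisions by one divmod plus a Bresenham-style
-- remainder accumulator deciding each block's size while consuming the list (objective: alternative).

-- ===== PORT A =====
def get_quantiles (data : List Int) (n_blocks : Int) : List (List Int) :=
  let total : Int := data.length
  (PySem.List.pyRange 0 n_blocks 1).foldl (fun blocks i =>
    blocks ++ [PySem.List.slice data (some (PySem.Int.floordiv (i * total) n_blocks))
                                     (some (PySem.Int.floordiv ((i + 1) * total) n_blocks))]) []

-- ===== PORT B =====
-- the 'for _ in range(n_blocks)' loop of Source B, recursing on the remaining iteration count;
-- state = (cursor pos, accumulator acc)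
def quantLoop (data : List Int) (q r n : Int) : Nat → Int → Int → List (List Int)
  | 0, _, _ => []
  | Nat.succ k, pos, acc =>
    let acc' := acc + r
    if n ≤ acc' then
      PySem.List.slice data (some pos) (some (pos + (q + 1))) ::
        quantLoop data q r n k (pos + (q + 1)) (acc' - n)
    else
      PySem.List.slice data (some pos) (some (pos + q)) ::
        quantLoop data q r n k (pos + q) acc'

def get_quantiles_alt (data : List Int) (n_blocks : Int) : List (List Int) :=
  if n_blocks ≤ 0 then []
  else
    let q := PySem.Int.floordiv (data.length : Int) n_blocks
    let r := PySem.Int.mod (data.length : Int) n_blocks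
    quantLoop data q r n_blocks n_blocks.toNat 0 0

-- ===== PRECONDITION & SPEC =====
def Spec_get_quantiles (data : List Int) (n_blocks : Int) (out : List (List Int)) : Prop := out = get_quantiles_alt data n_blocks
instance (data : List Int) (n_blocks : Int) (out : List (List Int)) : Decidable (Spec_get_quantiles data n_blocks out) := by unfold Spec_get_quantiles; infer_instance

-- ===== CLAIM (what is proved, stated in full; the proofs are below) =====
def Claim_equal_get_quantiles : Prop := ∀ (data : List Int) (n_blocks : Int), Dom_get_quantiles data n_blocks → Spec_get_quantiles data n_blocks (get_quantiles data n_blocks)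

-- ===== LEMMAS AND PROOFS =====

-- The loop invariant: after k blocks, B's remaining list is data dropped at the k-th
-- cut point ⌊k·t/n⌋ and its accumulator is (k·r) % n; the remaining m iterations
-- produce exactly blocks k, k+1, …, k+m-1 of A's boundary formula.
lemma quantLoop_eq (data : List Int) (n : Int) (hn : 0 < n) :
    ∀ (m k : Nat), (k : Int) + m ≤ n →
      quantLoop data ((data.length : Int) / n) ((data.length : Int) % n) n m
        ((k : Int) * data.length / n) ((k : Int) * ((data.length : Int) % n) % n)
      = (PySem.List.pyRange k (k + m) 1).map (fun i =>
          PySem.List.slice data (some (i * data.length / n)) (some ((i + 1) * data.length / n))) := by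
  intro m
  induction m with
  | zero =>
    intro k _
    simp [quantLoop]
  | succ m ih =>
    intro k hk
    set t : Int := (data.length : Int) with ht
    have ht0 : 0 ≤ t := by positivity
    set q : Int := t / n with hq
    set r : Int := t % n with hr
    have htqr : t = q * n + r := by rw [hq, hr, mul_comm]; exact (Int.mul_ediv_add_emod t n).symm
    have hr0 : 0 ≤ r := Int.emod_nonneg t (by omega)
    have hrn : r < n := Int.emod_lt_of_pos t hn
    set e : Int := (k : Int) * r % n with he
    have he0 : 0 ≤ e := Int.emod_nonneg _ (by omega)
    have hen : e < n := Int.emod_lt_of_pos _ hn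
    have hkr : (k : Int) * r = n * ((k : Int) * r / n) + e := by
      rw [he]; exact (Int.mul_ediv_add_emod ((k : Int) * r) n).symm
    -- cut points: s j = ⌊j·t/n⌋ = j·q + ⌊j·r/n⌋
    have hs : ∀ j : Int, j * t / n = j * q + j * r / n := by
      intro j
      have h' : j * t = j * r + (j * q) * n := by linear_combination j * htqr
      rw [h', Int.add_mul_ediv_right _ _ (by omega : n ≠ 0)]
      ring
    -- step of ⌊(k+1)·r/n⌋ and of the accumulator
    have h1 : ((k : Int) + 1) * r = (e + r) + ((k : Int) * r / n) * n := by
      linear_combination hkr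
    have hstep : ((k : Int) + 1) * r / n
        = (k : Int) * r / n + (if n ≤ e + r then 1 else 0) := by
      rw [h1, Int.add_mul_ediv_right _ _ (by omega : n ≠ 0)]
      rw [add_comm ((e + r) / n) _, add_right_inj]
      split_ifs with hc
      · have h2 : e + r = (e + r - n) + 1 * n := by ring
        rw [h2, Int.add_mul_ediv_right _ _ (by omega : n ≠ 0),
          Int.ediv_eq_zero_of_lt (by omega) (by omega)]
        omega
      · exact Int.ediv_eq_zero_of_lt (by omega) (by omega)
    have haccstep : ((k : Int) + 1) * r % n = if n ≤ e + r then e + r - n else e + r := by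
      rw [h1, Int.add_mul_emod_self_right _ _ _]
      split_ifs with hc
      · have h2 : e + r = (e + r - n) + 1 * n := by ring
        rw [h2, Int.add_mul_emod_self_right _ _ _, Int.emod_eq_of_lt (by omega) (by omega)]
        omega
      · exact Int.emod_eq_of_lt (by omega) (by omega)
    have hdiff : ((k : Int) + 1) * t / n - (k : Int) * t / n
        = q + (if n ≤ e + r then 1 else 0) := by
      rw [hs ((k : Int) + 1), hs (k : Int), hstep]; ring
    have hcast : ((k + 1 : Nat) : Int) = (k : Int) + 1 := by push_cast; ring
    -- RHS: peel the head of the range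
    have hrange : PySem.List.pyRange (k : Int) ((k : Int) + (m + 1 : Nat)) 1
        = (k : Int) :: PySem.List.pyRange ((k : Int) + 1) ((k : Int) + (m + 1 : Nat)) 1 := by
      apply PySem.List.pyRange_one_cons; push_cast; omega
    rw [hrange, List.map_cons]
    -- LHS: unfold one loop step
    show quantLoop data q r n (m + 1) ((k : Int) * t / n) e = _
    rw [quantLoop]
    by_cases hc : n ≤ e + r
    · rw [if_pos hc]
      rw [if_pos hc] at hdiff
      have hsum : (k : Int) * t / n + (q + 1) = ((k : Int) + 1) * t / n := by linarith [hdiff]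
      rw [hsum]
      congr 1
      have hacc : e + r - n = ((k + 1 : Nat) : Int) * r % n := by
        rw [hcast, haccstep, if_pos hc]
      rw [hacc]
      rw [show ((k : Int) + 1) = ((k + 1 : Nat) : Int) from by push_cast; ring,
        show ((k : Int) + ((m + 1 : Nat) : Int)) = ((k + 1 : Nat) : Int) + (m : Int) from by
          push_cast; ring]
      exact ih (k + 1) (by push_cast; push_cast at hk; omega)
    · rw [if_neg hc]
      rw [if_neg hc] at hdiff
      have hsum : (k : Int) * t / n + q = ((k : Int) + 1) * t / n := by linarith [hdiff]
      rw [hsum]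
      congr 1
      have hacc : e + r = ((k + 1 : Nat) : Int) * r % n := by
        rw [hcast, haccstep, if_neg hc]
      rw [hacc]
      rw [show ((k : Int) + 1) = ((k + 1 : Nat) : Int) from by push_cast; ring,
        show ((k : Int) + ((m + 1 : Nat) : Int)) = ((k + 1 : Nat) : Int) + (m : Int) from by
          push_cast; ring]
      exact ih (k + 1) (by push_cast; push_cast at hk; omega)

lemma a_eq_b (data : List Int) (n : Int) :
    get_quantiles data n = get_quantiles_alt data n := by
  unfold get_quantiles get_quantiles_alt
  by_cases h : n ≤ 0
  · simp [h, PySem.List.pyRange_one_eq_nil h]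
  · simp only [if_neg h]
    have hn : 0 < n := by omega
    rw [PySem.List.foldl_append_singleton_eq_map, List.nil_append]
    have hmain := quantLoop_eq data n hn n.toNat 0 (by omega)
    simp only [Nat.cast_zero, zero_mul, Int.zero_ediv, Int.zero_emod, Int.toNat_zero,
      List.drop_zero, zero_add] at hmain
    simp only [PySem.Int.floordiv_eq_ediv_of_pos hn, PySem.Int.mod_eq_emod_of_pos hn]
    rw [Int.toNat_of_nonneg (by omega : (0 : Int) ≤ n)] at hmain
    exact hmain.symm

-- ===== VERDICT (by name: the statement is the Claim_ definition above) =====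
theorem get_quantiles_spec : Claim_equal_get_quantiles := by
  intro data n _
  unfold Spec_get_quantiles
  exact a_eq_b data n
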